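-- pv_equiv track=rewrite | github.com/CS328-Fall2021/finalprojgroup4 | features.py | compute_dfreq_range
-- ===== SOURCE A (Python) =====
-- def compute_dfreq_range(window):
--     #TODO
--     x_coords = []
--     y_coords = []
--     z_coords = []
--
--     coords = [x_coords, y_coords, z_coords]
--
--     for coordinate in window:
--         for i in range(0, 3):
--             coords[i].append(coordinate[i])
--
--     ranges = [0, 0, 0]
--     for i in range(0, 3):
--         ranges[i] = max(coords[i]) - min(coords[i])
--
--     return ranges
-- ===== SOURCE B (Python) =====
-- def compute_dfreq_range(window):
--     xmin, ymin, zmin = window[0]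
--     xmax, ymax, zmax = xmin, ymin, zmin
--     for x, y, z in window[1:]:
--         if x < xmin: xmin = x
--         if x > xmax: xmax = x
--         if y < ymin: ymin = y
--         if y > ymax: ymax = y
--         if z < zmin: zmin = z
--         if z > zmax: zmax = z
--     return [xmax - xmin, ymax - ymin, zmax - zmin]
-- ===== Notes on version B (the rewrite author's own statement) =====
-- stated objective: alternative
-- what changed: B makes one pass keeping six running extremes (min/max per axis) instead of materializing three coordinate lists and scanning each twice with max() and min().
import Mathlib
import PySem

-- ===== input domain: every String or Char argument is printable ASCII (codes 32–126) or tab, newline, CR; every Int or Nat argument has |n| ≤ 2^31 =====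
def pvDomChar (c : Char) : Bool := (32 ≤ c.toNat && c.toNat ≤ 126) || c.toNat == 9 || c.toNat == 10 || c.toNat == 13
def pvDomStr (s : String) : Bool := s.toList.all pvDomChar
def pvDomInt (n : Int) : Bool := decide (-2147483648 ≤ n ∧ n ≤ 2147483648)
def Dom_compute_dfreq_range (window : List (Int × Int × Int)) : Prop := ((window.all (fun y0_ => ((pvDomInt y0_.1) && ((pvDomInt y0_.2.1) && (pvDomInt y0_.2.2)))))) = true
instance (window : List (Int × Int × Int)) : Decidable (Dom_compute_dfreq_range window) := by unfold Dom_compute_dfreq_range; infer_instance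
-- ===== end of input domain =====

-- B replaces A's materialize-three-lists-then-scan-twice shape with a single pass keeping six running extremes.


-- ===== PORT A =====
-- for coordinate in window: append coordinate[i] to coords[i]  (the range(0,3) inner loop unrolled over the tuple components)
def compute_dfreq_range (window : List (Int × Int × Int)) : List Int :=
  let coords := window.foldl
    (fun (a : List Int × List Int × List Int) coordinate =>
      (a.1 ++ [coordinate.1], a.2.1 ++ [coordinate.2.1], a.2.2 ++ [coordinate.2.2]))
    ([], [], [])
  -- Python max([])/min([]) raise ValueError: the empty window is excluded by Pre_; .getD 0 is unreachable there
  [((PySem.List.max? coords.1 (fun v => v)).getD 0) - ((PySem.List.min? coords.1 (fun v => v)).getD 0),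
   ((PySem.List.max? coords.2.1 (fun v => v)).getD 0) - ((PySem.List.min? coords.2.1 (fun v => v)).getD 0),
   ((PySem.List.max? coords.2.2 (fun v => v)).getD 0) - ((PySem.List.min? coords.2.2 (fun v => v)).getD 0)]

-- ===== PORT B =====
def pvAltLoop (xmin xmax ymin ymax zmin zmax : Int) : List (Int × Int × Int) → List Int
  | [] => [xmax - xmin, ymax - ymin, zmax - zmin]
  | (x, y, z) :: rest =>
      pvAltLoop (if x < xmin then x else xmin) (if x > xmax then x else xmax)
                (if y < ymin then y else ymin) (if y > ymax then y else ymax)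
                (if z < zmin then z else zmin) (if z > zmax then z else zmax) rest

def compute_dfreq_range_alt (window : List (Int × Int × Int)) : List Int :=
  match window with
  | [] => []  -- Python window[0] raises IndexError here; excluded by Pre_
  | (x, y, z) :: rest => pvAltLoop x x y y z z rest

-- ===== PRECONDITION & SPEC =====
-- Pre_ excludes exactly the empty window, on which Python A raises ValueError (max of empty sequence).
def Pre_compute_dfreq_range (window : List (Int × Int × Int)) : Prop := window ≠ []
instance (window : List (Int × Int × Int)) : Decidable (Pre_compute_dfreq_range window) := by unfold Pre_compute_dfreq_range; infer_instance
def pvWitness_compute_dfreq_range : (List (Int × Int × Int)) := [(1, 2, 3), (4, 0, 5)]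
def Spec_compute_dfreq_range (window : List (Int × Int × Int)) (out : List Int) : Prop := out = compute_dfreq_range_alt window
instance (window : List (Int × Int × Int)) (out : List Int) : Decidable (Spec_compute_dfreq_range window out) := by unfold Spec_compute_dfreq_range; infer_instance

-- ===== CLAIM =====
def Claim_equal_compute_dfreq_range : Prop := ∀ (window : List (Int × Int × Int)), Dom_compute_dfreq_range window → Pre_compute_dfreq_range window → Spec_compute_dfreq_range window (compute_dfreq_range window)

-- ===== LEMMAS AND PROOFS =====

theorem pvFoldl_coords (l : List (Int × Int × Int)) (a b c : List Int) :
    l.foldl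
      (fun (a : List Int × List Int × List Int) coordinate =>
        (a.1 ++ [coordinate.1], a.2.1 ++ [coordinate.2.1], a.2.2 ++ [coordinate.2.2]))
      (a, b, c)
    = (a ++ l.map (·.1), b ++ l.map (·.2.1), c ++ l.map (·.2.2)) := by
  induction l generalizing a b c with
  | nil => simp
  | cons h t ih => simp [List.foldl_cons, ih]

theorem pvAltLoop_eq (l : List (Int × Int × Int)) (xm xM ym yM zm zM : Int) :
    pvAltLoop xm xM ym yM zm zM l =
      [l.foldl (fun a c => max a c.1) xM - l.foldl (fun a c => min a c.1) xm,
       l.foldl (fun a c => max a c.2.1) yM - l.foldl (fun a c => min a c.2.1) ym,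
       l.foldl (fun a c => max a c.2.2) zM - l.foldl (fun a c => min a c.2.2) zm] := by
  induction l generalizing xm xM ym yM zm zM with
  | nil => simp [pvAltLoop]
  | cons h t ih =>
    obtain ⟨x, y, z⟩ := h
    have h1 : (if x < xm then x else xm) = min xm x := by rw [min_def]; split_ifs <;> omega
    have h2 : (if x > xM then x else xM) = max xM x := by rw [max_def]; split_ifs <;> omega
    have h3 : (if y < ym then y else ym) = min ym y := by rw [min_def]; split_ifs <;> omega
    have h4 : (if y > yM then y else yM) = max yM y := by rw [max_def]; split_ifs <;> omega
    have h5 : (if z < zm then z else zm) = min zm z := by rw [min_def]; split_ifs <;> omega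
    have h6 : (if z > zM then z else zM) = max zM z := by rw [max_def]; split_ifs <;> omega
    simp only [pvAltLoop, h1, h2, h3, h4, h5, h6, ih, List.foldl_cons]

-- ===== VERDICT =====
theorem compute_dfreq_range_spec : Claim_equal_compute_dfreq_range := by
  intro window _ hpre
  match window with
  | [] => exact absurd rfl hpre
  | (x, y, z) :: rest =>
    show compute_dfreq_range _ = _
    simp only [compute_dfreq_range, compute_dfreq_range_alt, pvFoldl_coords, List.nil_append,
      List.map_cons, PySem.List.max?_id_cons, PySem.List.min?_id_cons, Option.getD_some,
      pvAltLoop_eq, List.foldl_map]
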